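-- pv_equiv track=rewrite | github.com/adesh-dangi/code_practice_problems | leetcode/python/max_score_sub_string.py | check_one_char_with_others
-- ===== SOURCE A (Python) =====
-- def check_one_char_with_others(s, find_str, max_score, point):
--     stack = []
--     for i in s:
--         if stack and stack[-1]+i == find_str:
--             stack.pop()
--             max_score+=point
--         else:
--             stack.append(i)
--     return max_score, "".join(stack)
-- ===== SOURCE B (Python) =====
-- def check_one_char_with_others(s, find_str, max_score, point):
--     # Repeatedly delete the leftmost occurrence of the pattern until none
--     # remains, scoring one deletion per point.  Only a two-character pattern
--     # can ever be formed by an adjacent pair, so other lengths never match.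
--     if len(find_str) == 2:
--         i = s.find(find_str)
--         while i != -1:
--             s = s[:i] + s[i + 2:]
--             max_score += point
--             i = s.find(find_str)
--     return max_score, s
-- ===== Notes on version B (the rewrite author's own statement) =====
-- stated objective: alternative
-- what changed: B repeatedly searches the whole string for the leftmost occurrence of the (necessarily two-character) pattern and splices it out until none remains, scoring one deletion per point, instead of A's single left-to-right pass with a cancellation stack and a running score; equality rests on leftmost pair deletion reaching the same normal form and count as the stack reduction.
import Mathlib
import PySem

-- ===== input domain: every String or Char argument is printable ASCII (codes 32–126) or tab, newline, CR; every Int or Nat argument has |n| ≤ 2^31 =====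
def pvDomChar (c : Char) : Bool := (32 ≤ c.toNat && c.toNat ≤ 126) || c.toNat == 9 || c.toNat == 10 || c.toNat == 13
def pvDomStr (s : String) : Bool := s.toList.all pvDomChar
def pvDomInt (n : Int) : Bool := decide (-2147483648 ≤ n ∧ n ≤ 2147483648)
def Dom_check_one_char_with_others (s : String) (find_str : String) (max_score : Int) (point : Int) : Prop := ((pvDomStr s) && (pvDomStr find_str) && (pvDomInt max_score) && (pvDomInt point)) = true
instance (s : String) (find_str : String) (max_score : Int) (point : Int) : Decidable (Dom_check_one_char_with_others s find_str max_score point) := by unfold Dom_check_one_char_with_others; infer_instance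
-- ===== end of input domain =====

-- B replaces A's single-pass cancellation stack by repeated leftmost-occurrence deletion
-- of the two-character pattern; objective: alternative algorithm, same result.

-- ===== PORT A =====
-- A's stack is a Python list with the top at the end; it is represented here as a
-- List Char with the top at the HEAD, so append = cons, pop = tail, and
-- "".join(stack) = String.ofList of the reversed list.  The loop body is the named
-- helper pvStepA; the fold state is (stack, max_score).
def pvStepA (find_str : String) (point : Int) (st : List Char × Int) (i : Char) : List Char × Int :=
  match st.1 with
  | top :: rest =>
      -- 'stack and stack[-1]+i == find_str'
      if String.ofList [top, i] = find_str then (rest, st.2 + point)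
      else (i :: top :: rest, st.2)
  | [] => ([i], st.2)

def check_one_char_with_others (s : String) (find_str : String) (max_score : Int) (point : Int) : Int × String :=
  let r := s.toList.foldl (pvStepA find_str point) ([], max_score)
  (r.2, String.ofList r.1.reverse)

-- ===== PORT B =====
-- Source B's 's.find(find_str)' for a two-character pattern "ab" is exactly the first
-- index i with s[i] = a and s[i+1] = b (exact: no shorter/longer match possible).
def pvFirstOcc (a b : Char) : List Char → Option Nat
  | x :: y :: r => if x = a ∧ y = b then some 0 else (pvFirstOcc a b (y :: r)).map (· + 1)
  | _ => none

-- needed by pvLoopB's termination: an occurrence index leaves room for two characters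
theorem pvFirstOcc_le (a b : Char) : ∀ (l : List Char) (i : Nat), pvFirstOcc a b l = some i → i + 2 ≤ l.length := by
  intro l
  induction l with
  | nil => intro i h; simp [pvFirstOcc] at h
  | cons x t ih =>
      cases t with
      | nil => intro i h; simp [pvFirstOcc] at h
      | cons y r =>
          intro i h
          rw [pvFirstOcc] at h
          split_ifs at h with hc
          · simp only [Option.some.injEq] at h
            simp [← h]
          · rw [Option.map_eq_some_iff] at h
            obtain ⟨j, hj, hji⟩ := h
            have := ih j hj
            simp only [List.length_cons] at this ⊢
            omega

-- Source B's while loop: 'while i != -1: s = s[:i] + s[i+2:]; max_score += point; i = s.find(find_str)'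
def pvLoopB (a b : Char) (point : Int) (l : List Char) (m : Int) : Int × List Char :=
  match h : pvFirstOcc a b l with
  | some i => pvLoopB a b point (l.take i ++ l.drop (i + 2)) (m + point)
  | none => (m, l)
termination_by l.length
decreasing_by
  have := pvFirstOcc_le a b l i h
  simp only [List.length_append, List.length_take, List.length_drop]
  omega

def check_one_char_with_others_alt (s : String) (find_str : String) (max_score : Int) (point : Int) : Int × String :=
  match find_str.toList with
  | [a, b] =>
      -- 'if len(find_str) == 2'
      let r := pvLoopB a b point s.toList max_score
      (r.1, String.ofList r.2)
  | _ => (max_score, s)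

-- ===== PRECONDITION & SPEC =====
def Spec_check_one_char_with_others (s : String) (find_str : String) (max_score : Int) (point : Int) (out : Int × String) : Prop := out = check_one_char_with_others_alt s find_str max_score point
instance (s : String) (find_str : String) (max_score : Int) (point : Int) (out : Int × String) : Decidable (Spec_check_one_char_with_others s find_str max_score point out) := by unfold Spec_check_one_char_with_others; infer_instance

-- ===== CLAIM (what is proved, stated in full; the proofs are below) =====
def Claim_equal_check_one_char_with_others : Prop := ∀ (s : String) (find_str : String) (max_score : Int) (point : Int), Dom_check_one_char_with_others s find_str max_score point → Spec_check_one_char_with_others s find_str max_score point (check_one_char_with_others s find_str max_score point)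

-- ===== LEMMAS AND PROOFS =====

theorem pvStepA_nil (fs : String) (pt m : Int) (i : Char) : pvStepA fs pt ([], m) i = ([i], m) := rfl
theorem pvStepA_cons (fs : String) (pt m : Int) (top i : Char) (rest : List Char) :
    pvStepA fs pt (top :: rest, m) i =
      if String.ofList [top, i] = fs then (rest, m + pt) else (i :: top :: rest, m) := rfl

theorem cond_iff2 (t c a b : Char) (fs : String) (h : fs.toList = [a, b]) :
    (String.ofList [t, c] = fs) ↔ (t = a ∧ c = b) := by
  constructor
  · intro he
    have h2 : ([t, c] : List Char) = [a, b] := by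
      have := congrArg String.toList he; simpa [h] using this
    simp at h2; exact h2
  · rintro ⟨rfl, rfl⟩
    have h2 : fs = String.ofList fs.toList := by simp
    rw [h2, h]

theorem cond_false2 (t c : Char) (fs : String) (h : ∀ a b : Char, fs.toList ≠ [a, b]) :
    String.ofList [t, c] ≠ fs := by
  intro he
  exact h t c (by have := congrArg String.toList he; simpa using this.symm)

-- when the arriving character cannot be the pattern's second letter, A's step just pushes
theorem stepA_push (fs : String) (pt : Int) (a b : Char) (hfs : fs.toList = [a, b])
    (σ : List Char) (m : Int) (x : Char) (hx : x ≠ b) :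
    pvStepA fs pt (σ, m) x = (x :: σ, m) := by
  cases σ with
  | nil => rfl
  | cons t r =>
      rw [pvStepA_cons, if_neg]
      rw [cond_iff2 t x a b fs hfs]
      exact fun hc => hx hc.2

-- processing the pattern's two letters on a stack whose top cannot cancel the first
-- letter removes nothing else: one cancellation, score + point
theorem stepA_pair (fs : String) (pt : Int) (a b : Char) (hfs : fs.toList = [a, b])
    (v σ : List Char) (m : Int) (hσ : a ≠ b ∨ σ.head? ≠ some a) :
    (a :: b :: v).foldl (pvStepA fs pt) (σ, m) = v.foldl (pvStepA fs pt) (σ, m + pt) := by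
  have h1 : pvStepA fs pt (σ, m) a = (a :: σ, m) := by
    cases σ with
    | nil => rfl
    | cons t r =>
        rw [pvStepA_cons, if_neg]
        rw [cond_iff2 t a a b fs hfs]
        rintro ⟨rfl, rfl⟩
        rcases hσ with h | h
        · exact h rfl
        · exact h rfl
  have h2 : pvStepA fs pt (a :: σ, m) b = (σ, m + pt) := by
    rw [pvStepA_cons, if_pos ((cond_iff2 a b a b fs hfs).mpr ⟨rfl, rfl⟩)]
  simp [List.foldl_cons, h1, h2]

-- deleting the LEFTMOST occurrence of the pattern before running A's pass changes
-- nothing but one cancellation (the heart of the equivalence)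
theorem delete_first (fs : String) (pt : Int) (a b : Char) (hfs : fs.toList = [a, b]) :
    ∀ (l : List Char) (i : Nat) (σ : List Char) (m : Int),
      pvFirstOcc a b l = some i →
      (i = 0 → (a ≠ b ∨ σ.head? ≠ some a)) →
      l.foldl (pvStepA fs pt) (σ, m)
        = (l.take i ++ l.drop (i + 2)).foldl (pvStepA fs pt) (σ, m + pt) := by
  intro l
  induction l with
  | nil => intro i σ m h _; simp [pvFirstOcc] at h
  | cons x t ih =>
      cases t with
      | nil => intro i σ m h _; simp [pvFirstOcc] at h
      | cons y r =>
          intro i σ m h hgood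
          rw [pvFirstOcc] at h
          split_ifs at h with hc
          · -- occurrence at position 0: x = a, y = b
            simp only [Option.some.injEq] at h
            subst h
            obtain ⟨rfl, rfl⟩ := hc
            simpa using stepA_pair fs pt x y hfs r σ m (hgood rfl)
          · rw [Option.map_eq_some_iff] at h
            obtain ⟨j, hj, hji⟩ := h
            subst hji
            -- both sides take the same first step on x
            have hsplit : (x :: y :: r).take (j + 1) ++ (x :: y :: r).drop (j + 1 + 2)
                = x :: ((y :: r).take j ++ (y :: r).drop (j + 2)) := by
              simp [List.take_succ_cons, List.drop_succ_cons]
            rw [hsplit]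
            simp only [List.foldl_cons]
            rcases hst : pvStepA fs pt (σ, m) x with ⟨σ', m'⟩
            have hm' : pvStepA fs pt (σ, m + pt) x = (σ', m' + pt) := by
              rcases σ with _ | ⟨u, w⟩
              · rw [pvStepA_nil] at hst ⊢
                simp_all
              · rw [pvStepA_cons] at hst ⊢
                split_ifs at hst ⊢ with hcc <;> simp_all
            rw [hm']
            refine ih j σ' m' hj ?_
            intro hj0
            subst hj0
            -- the occurrence is at position 1: y = a and r starts with b
            rcases r with _ | ⟨z, r'⟩
            · simp [pvFirstOcc] at hj
            · rw [pvFirstOcc] at hj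
              split_ifs at hj with hc2
              · obtain ⟨rfl, rfl⟩ := hc2
                by_cases hab : y = z
                · -- equal letters and ¬(x = y ∧ y = z) force x ≠ z, so x was pushed
                  right
                  have hx : x ≠ z := fun hxz => hc ⟨hxz.trans hab.symm, hab⟩
                  have hp := stepA_push fs pt y z hfs σ m x hx
                  rw [hp] at hst
                  simp only [Prod.mk.injEq] at hst
                  rw [← hst.1]
                  simp only [List.head?_cons, ne_eq, Option.some.injEq]
                  intro hxy
                  exact hc ⟨hxy, hab⟩
                · exact Or.inl hab
              · simp at hj
  -- end delete_first

-- with no occurrence left, A's pass cancels nothing (stack = reversed input)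
theorem no_occ (fs : String) (pt : Int) (a b : Char) (hfs : fs.toList = [a, b]) :
    ∀ (l σ : List Char) (m : Int),
      pvFirstOcc a b l = none →
      (σ.head? = some a → l.head? ≠ some b) →
      l.foldl (pvStepA fs pt) (σ, m) = (l.reverse ++ σ, m) := by
  intro l
  induction l with
  | nil => intro σ m _ _; simp
  | cons x t ih =>
      intro σ m h hhd
      have hstep : pvStepA fs pt (σ, m) x = (x :: σ, m) := by
        cases σ with
        | nil => rfl
        | cons u w =>
            rw [pvStepA_cons, if_neg]
            rw [cond_iff2 u x a b fs hfs]
            rintro ⟨rfl, rfl⟩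
            exact hhd rfl rfl
      have hrec : pvFirstOcc a b t = none ∧ ((x :: σ).head? = some a → t.head? ≠ some b) := by
        rcases t with _ | ⟨y, r⟩
        · exact ⟨rfl, by simp⟩
        · rw [pvFirstOcc] at h
          split_ifs at h with hc
          refine ⟨Option.map_eq_none_iff.mp h, ?_⟩
          intro hx hy
          simp only [List.head?_cons, Option.some.injEq] at hx hy
          exact hc ⟨hx, hy⟩
      calc (x :: t).foldl (pvStepA fs pt) (σ, m)
          = t.foldl (pvStepA fs pt) (x :: σ, m) := by simp [List.foldl_cons, hstep]
        _ = (t.reverse ++ (x :: σ), m) := ih (x :: σ) m hrec.1 hrec.2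
        _ = ((x :: t).reverse ++ σ, m) := by simp

-- B's deletion loop computes exactly A's final score and (reversed) stack
-- unfolding equations for pvLoopB (well-founded definition)
theorem pvLoopB_some (a b : Char) (pt : Int) (l : List Char) (m : Int) (i : Nat)
    (h : pvFirstOcc a b l = some i) :
    pvLoopB a b pt l m = pvLoopB a b pt (l.take i ++ l.drop (i + 2)) (m + pt) := by
  rw [pvLoopB]
  split <;> simp_all

theorem pvLoopB_none (a b : Char) (pt : Int) (l : List Char) (m : Int)
    (h : pvFirstOcc a b l = none) :
    pvLoopB a b pt l m = (m, l) := by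
  rw [pvLoopB]
  split <;> simp_all

theorem loopB_eq (fs : String) (pt : Int) (a b : Char) (hfs : fs.toList = [a, b]) :
    ∀ (l : List Char) (m : Int),
      pvLoopB a b pt l m
        = ((l.foldl (pvStepA fs pt) ([], m)).2, (l.foldl (pvStepA fs pt) ([], m)).1.reverse) := by
  intro l m
  induction l, m using pvLoopB.induct a b pt with
  | case1 l m i hocc ih =>
      rw [pvLoopB_some a b pt l m i hocc]
      rw [ih]
      rw [delete_first fs pt a b hfs l i [] m hocc (fun _ => by simp)]
  | case2 l m hocc =>
      rw [pvLoopB_none a b pt l m hocc]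
      rw [no_occ fs pt a b hfs l [] m hocc (by simp)]
      simp

-- neither program ever cancels/deletes when find_str is not a two-character string
theorem pushA (fs : String) (pt : Int) (h : ∀ a b : Char, fs.toList ≠ [a, b]) (l : List Char) :
    ∀ (σ : List Char) (m : Int), l.foldl (pvStepA fs pt) (σ, m) = (l.reverse ++ σ, m) := by
  induction l with
  | nil => intro σ m; simp
  | cons c t ih =>
      intro σ m
      have hstep : pvStepA fs pt (σ, m) c = (c :: σ, m) := by
        cases σ with
        | nil => rfl
        | cons top rest => rw [pvStepA_cons, if_neg (cond_false2 top c fs h)]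
      calc (c :: t).foldl (pvStepA fs pt) (σ, m) = t.foldl (pvStepA fs pt) (c :: σ, m) := by
            simp [List.foldl_cons, hstep]
        _ = (t.reverse ++ (c :: σ), m) := ih _ _
        _ = ((c :: t).reverse ++ σ, m) := by simp

-- ===== VERDICT (by name: the statement is the Claim_ definition above) =====
theorem check_one_char_with_others_spec : Claim_equal_check_one_char_with_others := by
  intro s find_str max_score point _
  unfold Spec_check_one_char_with_others
  by_cases h2 : ∃ a b : Char, find_str.toList = [a, b]
  · obtain ⟨a, b, hfs⟩ := h2
    have halt : check_one_char_with_others_alt s find_str max_score point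
        = ((pvLoopB a b point s.toList max_score).1,
           String.ofList (pvLoopB a b point s.toList max_score).2) := by
      unfold check_one_char_with_others_alt
      rw [hfs]
    rw [halt]
    unfold check_one_char_with_others
    rw [loopB_eq find_str point a b hfs s.toList max_score]
  · push Not at h2
    have halt : check_one_char_with_others_alt s find_str max_score point
        = (max_score, s) := by
      unfold check_one_char_with_others_alt
      rcases hl : find_str.toList with _ | ⟨a, _ | ⟨b, _ | ⟨c, t⟩⟩⟩
      · rfl
      · rfl
      · exact absurd hl (h2 a b)
      · rfl
    rw [halt]
    unfold check_one_char_with_others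
    rw [pushA find_str point h2 s.toList [] max_score]
    simp
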